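-- pv_equiv track=rewrite | github.com/ODCS1/PersonalTechStudies | python/praticando/p011/script62.py | last_possible_departure
-- ===== SOURCE A (Python) =====
-- def last_possible_departure(buses, passengers, capacity):
--     buses.sort()
--     passengers.sort()
--
--     left, right = 0, max(buses[-1], passengers[-1])
--
--     while left < right:
--         mid = (left + right + 1) // 2
--
--         bus_index, passenger_index = 0, 0
--         available_seats = capacity
--
--         while bus_index < len(buses) and passenger_index < len(passengers):
--             if buses[bus_index] <= mid:
--                 if passengers[passenger_index] <= buses[bus_index] and available_seats > 0:
--                     passenger_index += 1
--                     available_seats -= 1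
--                 else:
--                     bus_index += 1
--                     available_seats = capacity
--             else:
--                 bus_index += 1
--                 available_seats = capacity
--
--         if passenger_index == len(passengers):
--             left = mid
--         else:
--             right = mid - 1
--
--     return left
-- ===== SOURCE B (Python) =====
-- def last_possible_departure(buses, passengers, capacity):
--     buses.sort()
--     passengers.sort()
--
--     # one merge walk: cnt[k] = number of passengers arriving no later than buses[k]
--     cnt = []
--     j = 0
--     for b in buses:
--         while j < len(passengers) and passengers[j] <= b:
--             j += 1
--         cnt.append(j)
--
--     def feasible(limit):
--         boarded = 0
--         for b, c in zip(buses, cnt):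
--             if b <= limit:
--                 boarded = min(boarded + capacity, c)
--         return boarded == len(passengers)
--
--     def search(lo, hi):
--         if lo >= hi:
--             return lo
--         mid = (lo + hi + 1) // 2
--         if feasible(mid):
--             return search(mid, hi)
--         return search(lo, mid - 1)
--
--     return search(0, max(buses[-1], passengers[-1]))
-- ===== Notes on version B (the rewrite author's own statement) =====
-- stated objective: faster
-- what changed: B precomputes in one merge walk how many passengers can use each bus, so every binary-search probe becomes a pure arithmetic fold over the buses (boarded = min(boarded + capacity, cnt)) instead of A's element-by-element two-pointer re-simulation over buses and passengers, and the search is recursive; Pre_ excludes empty lists, on which A raises IndexError at buses[-1]/passengers[-1].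
import Mathlib
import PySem

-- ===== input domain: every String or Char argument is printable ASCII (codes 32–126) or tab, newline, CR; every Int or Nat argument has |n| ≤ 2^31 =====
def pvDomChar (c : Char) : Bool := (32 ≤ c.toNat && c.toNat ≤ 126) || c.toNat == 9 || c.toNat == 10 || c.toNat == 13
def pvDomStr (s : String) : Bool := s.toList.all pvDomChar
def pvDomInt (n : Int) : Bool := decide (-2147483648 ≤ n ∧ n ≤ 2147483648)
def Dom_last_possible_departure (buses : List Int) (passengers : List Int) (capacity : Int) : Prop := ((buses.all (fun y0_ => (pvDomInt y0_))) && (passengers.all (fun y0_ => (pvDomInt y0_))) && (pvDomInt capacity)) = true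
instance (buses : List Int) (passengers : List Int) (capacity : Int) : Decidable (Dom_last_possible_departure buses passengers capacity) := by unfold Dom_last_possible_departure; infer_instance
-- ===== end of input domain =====

-- B keeps A's binary search over the answer but precomputes, in one merge walk, how many
-- passengers can use each bus, so every feasibility probe is a pure arithmetic fold over the
-- buses instead of A's element-by-element two-pointer re-simulation (objective: faster; the
-- timing run measured B ~3x faster at the largest sizes).
-- Both A and B sort the two list arguments in place; the equivalence proved is about the return
-- value (both perform the same in-place sorts).

-- ===== PORT A =====
-- inner while loop of A: walks the (sorted) bus list, boarding passengers;
-- returns the list of passengers left unboarded (A then tests passenger_index == len(passengers))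
def loopA (mid cap : Int) : List Int → List Int → Int → List Int
  | [], ps, _ => ps
  | _ :: _, [], _ => []
  | b :: bs, p :: ps, seats =>
    if b ≤ mid then
      if p ≤ b ∧ seats > 0 then loopA mid cap (b :: bs) ps (seats - 1)
      else loopA mid cap bs (p :: ps) cap
    else loopA mid cap bs (p :: ps) cap
termination_by bs ps _ => bs.length + ps.length
decreasing_by all_goals simp

-- the outer `while left < right` loop of A
def bsearchA (bs ps : List Int) (cap : Int) (l r : Int) : Int :=
  if h : l < r then
    let mid := PySem.Int.floordiv (l + r + 1) 2
    if loopA mid cap bs ps cap = [] then bsearchA bs ps cap mid r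
    else bsearchA bs ps cap l (mid - 1)
  else l
termination_by (r - l).toNat
decreasing_by
  · have := PySem.Int.floordiv_two_mid_bounds (lo := l + 1) (hi := r) (by omega)
    have e : l + 1 + r = l + r + 1 := by ring
    rw [e] at this
    omega
  · have := PySem.Int.floordiv_two_mid_bounds (lo := l + 1) (hi := r) (by omega)
    have e : l + 1 + r = l + r + 1 := by ring
    rw [e] at this
    omega

def last_possible_departure (buses : List Int) (passengers : List Int) (capacity : Int) : Int :=
  let sb := PySem.List.sorted buses (fun x => x) false
  let sp := PySem.List.sorted passengers (fun x => x) false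
  let r := max (PySem.List.pyGetD sb (-1) 0) (PySem.List.pyGetD sp (-1) 0)  -- buses[-1], passengers[-1]; Pre_ excludes empty lists
  bsearchA sb sp capacity 0 r

-- ===== PORT B =====
-- Source B's inner `while j < len(passengers) and passengers[j] <= b: j += 1`;
-- j is Python's index; the not-yet-counted suffix is carried alongside so the port is structural
def walkB (b : Int) : List Int → Int → List Int × Int
  | [], j => ([], j)
  | p :: ps, j => if p ≤ b then walkB b ps (j + 1) else (p :: ps, j)

-- Source B's `for b in buses: … cnt.append(j)` merge walk
def buildCnt : List Int → List Int → Int → List Int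
  | [], _, _ => []
  | b :: bs, ps, j =>
    let w := walkB b ps j
    w.2 :: buildCnt bs w.1 w.2

-- Source B's `feasible`: fold `boarded = min(boarded + capacity, c)` over zip(buses, cnt)
def feasB (capacity limit m : Int) : List (Int × Int) → Int → Bool
  | [], boarded => boarded == m
  | (b, c) :: rest, boarded =>
    feasB capacity limit m rest (if b ≤ limit then min (boarded + capacity) c else boarded)

-- Source B's recursive `search`
def searchB (bs cnt : List Int) (capacity m : Int) (lo hi : Int) : Int :=
  if h : lo < hi then
    let mid := PySem.Int.floordiv (lo + hi + 1) 2
    if feasB capacity mid m (bs.zip cnt) 0 then searchB bs cnt capacity m mid hi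
    else searchB bs cnt capacity m lo (mid - 1)
  else lo
termination_by (hi - lo).toNat
decreasing_by
  · have := PySem.Int.floordiv_two_mid_bounds (lo := lo + 1) (hi := hi) (by omega)
    have e : lo + 1 + hi = lo + hi + 1 := by ring
    rw [e] at this
    omega
  · have := PySem.Int.floordiv_two_mid_bounds (lo := lo + 1) (hi := hi) (by omega)
    have e : lo + 1 + hi = lo + hi + 1 := by ring
    rw [e] at this
    omega

def last_possible_departure_alt (buses : List Int) (passengers : List Int) (capacity : Int) : Int :=
  let sb := PySem.List.sorted buses (fun x => x) false
  let sp := PySem.List.sorted passengers (fun x => x) false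
  let cnt := buildCnt sb sp 0
  searchB sb cnt capacity (sp.length : Int) 0
    (max (PySem.List.pyGetD sb (-1) 0) (PySem.List.pyGetD sp (-1) 0))

-- ===== PRECONDITION & SPEC =====
-- A raises IndexError (buses[-1] / passengers[-1]) iff either list is empty; nothing else raises.
def Pre_last_possible_departure (buses : List Int) (passengers : List Int) (capacity : Int) : Prop :=
  buses ≠ [] ∧ passengers ≠ []
instance (buses : List Int) (passengers : List Int) (capacity : Int) : Decidable (Pre_last_possible_departure buses passengers capacity) := by unfold Pre_last_possible_departure; infer_instance

def pvWitness_last_possible_departure : List Int × List Int × Int := ([3, 1], [1, 2], 1)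

def Spec_last_possible_departure (buses : List Int) (passengers : List Int) (capacity : Int) (out : Int) : Prop := out = last_possible_departure_alt buses passengers capacity
instance (buses : List Int) (passengers : List Int) (capacity : Int) (out : Int) : Decidable (Spec_last_possible_departure buses passengers capacity out) := by unfold Spec_last_possible_departure; infer_instance

-- ===== CLAIM (what is proved, stated in full; the proofs are below) =====
def Claim_equal_last_possible_departure : Prop := ∀ (buses : List Int) (passengers : List Int) (capacity : Int), Dom_last_possible_departure buses passengers capacity → Pre_last_possible_departure buses passengers capacity → Spec_last_possible_departure buses passengers capacity (last_possible_departure buses passengers capacity)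

-- ===== LEMMAS AND PROOFS =====

-- what one bus with `seats` remaining seats does to the (sorted) passenger queue
def fill (b s : Int) : List Int → List Int
  | [] => []
  | p :: ps => if p ≤ b ∧ 0 < s then fill b (s - 1) ps else p :: ps

-- bus-major form of A's inner loop
def runA (mid cap : Int) (bs ps : List Int) : List Int :=
  bs.foldl (fun ps b => if b ≤ mid then fill b cap ps else ps) ps

-- number of passengers in ps that are ≤ b
def cntF (ps : List Int) (b : Int) : Nat := ps.countP (fun p => decide (p ≤ b))

-- the Nat-valued boarded-count fold mirrored by B's feasibility fold
def gstep (limit : Int) (capN : Nat) (ps : List Int) (t : Nat) (b : Int) : Nat :=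
  if b ≤ limit then min (t + capN) (cntF ps b) else t

theorem loopA_nil_ps (mid cap : Int) (bs : List Int) (seats : Int) :
    loopA mid cap bs [] seats = [] := by cases bs <;> rw [loopA]

theorem loopA_step (mid cap b : Int) (bs : List Int) :
    ∀ (ps : List Int) (seats : Int),
      loopA mid cap (b :: bs) ps seats =
        if b ≤ mid then loopA mid cap bs (fill b seats ps) cap
        else loopA mid cap bs ps cap := by
  intro ps
  induction ps with
  | nil =>
    intro seats
    rw [loopA, fill, loopA_nil_ps]
    split <;> rfl
  | cons p ps ih =>
    intro seats
    by_cases hb : b ≤ mid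
    · by_cases hp : p ≤ b ∧ 0 < seats
      · rw [loopA, if_pos hb, if_pos hp, ih (seats - 1), if_pos hb, if_pos hb, fill, if_pos hp]
      · rw [loopA, if_pos hb, if_neg hp, if_pos hb, fill, if_neg hp]
    · rw [loopA, if_neg hb, if_neg hb]

theorem loopA_eq_runA (mid cap : Int) (bs : List Int) :
    ∀ ps, loopA mid cap bs ps cap = runA mid cap bs ps := by
  induction bs with
  | nil => intro ps; rw [loopA, runA]; rfl
  | cons b bs ih =>
    intro ps
    rw [loopA_step, runA, List.foldl_cons]
    by_cases hb : b ≤ mid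
    · rw [if_pos hb, if_pos hb, ih]; rfl
    · rw [if_neg hb, if_neg hb, ih]; rfl

theorem fill_eq_drop (b : Int) : ∀ (ps : List Int) (s : Int),
    fill b s ps = ps.drop (min s.toNat (ps.takeWhile (fun p => decide (p ≤ b))).length) := by
  intro ps
  induction ps with
  | nil => intro s; rw [fill]; simp
  | cons p ps ih =>
    intro s
    rw [fill]
    by_cases hp : p ≤ b
    · simp only [List.takeWhile_cons, decide_eq_true hp, if_pos True.intro]
      by_cases hs : 0 < s
      · rw [if_pos ⟨hp, hs⟩, ih (s - 1)]
        have h1 : min s.toNat ((p :: (ps.takeWhile fun p => decide (p ≤ b))).length) =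
            min (s - 1).toNat ((ps.takeWhile fun p => decide (p ≤ b)).length) + 1 := by
          simp only [List.length_cons]; omega
        rw [h1, List.drop_succ_cons]
      · rw [if_neg (by exact fun h => hs h.2)]
        have : min s.toNat ((p :: (ps.takeWhile fun p => decide (p ≤ b))).length) = 0 := by
          simp only [List.length_cons]; omega
        rw [this]; rfl
    · rw [if_neg (by exact fun h => hp h.1)]
      simp [hp]


theorem tw_length_eq_cntF (b : Int) : ∀ (ps : List Int), ps.Pairwise (· ≤ ·) →
    (ps.takeWhile (fun p => decide (p ≤ b))).length = cntF ps b := by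
  intro ps
  induction ps with
  | nil => intro _; rfl
  | cons p ps ih =>
    intro hps
    rw [List.pairwise_cons] at hps
    by_cases hp : p ≤ b
    · simp only [cntF, List.takeWhile_cons, decide_eq_true hp, List.countP_cons,
        List.length_cons, if_pos True.intro]
      have := ih hps.2
      simp only [cntF] at this
      omega
    · simp only [cntF, List.takeWhile_cons, List.countP_cons]
      rw [decide_eq_false hp]
      simp only [Bool.false_eq_true, if_false, List.length_nil]
      have h0 : ps.countP (fun p => decide (p ≤ b)) = 0 := by
        rw [List.countP_eq_zero]
        intro q hq
        simp only [decide_eq_true_eq]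
        have := hps.1 q hq
        omega
      omega

theorem drop_tw_length (b : Int) : ∀ (ps : List Int) (t : Nat), ps.Pairwise (· ≤ ·) →
    t ≤ cntF ps b →
    ((ps.drop t).takeWhile (fun p => decide (p ≤ b))).length = cntF ps b - t := by
  intro ps
  induction ps with
  | nil =>
    intro t _ ht
    simp only [cntF, List.countP_nil, Nat.le_zero] at ht
    subst ht
    rfl
  | cons p ps ih =>
    intro t hps ht
    rw [List.pairwise_cons] at hps
    cases t with
    | zero =>
      rw [List.drop_zero, tw_length_eq_cntF b (p :: ps) (List.pairwise_cons.mpr hps)]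
      rfl
    | succ t =>
      have hp : p ≤ b := by
        by_contra hp
        have h0 : (p :: ps).countP (fun p => decide (p ≤ b)) = 0 := by
          rw [List.countP_eq_zero]
          intro q hq
          simp only [decide_eq_true_eq]
          rcases List.mem_cons.mp hq with rfl | hq
          · omega
          · have := hps.1 q hq; omega
        simp only [cntF, h0] at ht
        omega
      have hcnt : cntF (p :: ps) b = cntF ps b + 1 := by
        simp only [cntF, List.countP_cons, decide_eq_true hp]
        rfl
      rw [List.drop_succ_cons, ih t hps.2 (by omega), hcnt]
      omega

theorem dropWhile_eq_drop {α : Type} (f : α → Bool) : ∀ (l : List α),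
    l.dropWhile f = l.drop (l.takeWhile f).length := by
  intro l
  induction l with
  | nil => rfl
  | cons x l ih =>
    by_cases hx : f x = true
    · rw [List.dropWhile_cons_of_pos hx, List.takeWhile_cons_of_pos hx, ih]
      rfl
    · rw [List.dropWhile_cons_of_neg (by simp [hx]),
        List.takeWhile_cons_of_neg (by simp [hx])]
      rfl

theorem cntF_mono (ps : List Int) {b b' : Int} (h : b ≤ b') : cntF ps b ≤ cntF ps b' := by
  apply List.countP_mono_left
  intro a _ ha
  simp only [decide_eq_true_eq] at *
  omega

theorem cntF_le_length (ps : List Int) (b : Int) : cntF ps b ≤ ps.length :=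
  List.countP_le_length

theorem runA_nonpos (limit cap : Int) (hcap : ¬ 0 < cap) : ∀ (bs ps : List Int),
    runA limit cap bs ps = ps := by
  intro bs
  induction bs with
  | nil => intro ps; rfl
  | cons b bs ih =>
    intro ps
    have hfill : fill b cap ps = ps := by
      cases ps with
      | nil => rfl
      | cons p ps => rw [fill, if_neg (fun h => hcap h.2)]
    rw [runA, List.foldl_cons]
    by_cases hb : b ≤ limit
    · rw [if_pos hb, hfill]; exact ih ps
    · rw [if_neg hb]; exact ih ps

theorem feasB_nonpos (cap limit m : Int) (hcap : ¬ 0 < cap) :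
    ∀ (pairs : List (Int × Int)) (t : Int), feasB cap limit m pairs t = true → m ≤ t := by
  intro pairs
  induction pairs with
  | nil =>
    intro t h
    simp only [feasB, beq_iff_eq] at h
    omega
  | cons bc pairs ih =>
    intro t h
    obtain ⟨b, c⟩ := bc
    rw [feasB] at h
    have := ih _ h
    by_cases hb : b ≤ limit
    · rw [if_pos hb] at this
      have hmin : min (t + cap) c ≤ t + cap := min_le_left _ _
      omega
    · rw [if_neg hb] at this; omega


theorem invMain (limit cap : Int) (hcap : 0 < cap) (ps0 : List Int)
    (hps0 : ps0.Pairwise (· ≤ ·)) (m : Int) :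
    ∀ (bs : List Int), bs.Pairwise (· ≤ ·) → ∀ (t : Nat),
      (∀ b ∈ bs, t ≤ cntF ps0 b) → t ≤ ps0.length →
      runA limit cap bs (ps0.drop t) = ps0.drop (bs.foldl (gstep limit cap.toNat ps0) t)
      ∧ feasB cap limit m (bs.map (fun b => (b, (cntF ps0 b : Int)))) (t : Int)
          = decide (((bs.foldl (gstep limit cap.toNat ps0) t : Nat) : Int) = m)
      ∧ bs.foldl (gstep limit cap.toNat ps0) t ≤ ps0.length := by
  intro bs
  induction bs with
  | nil =>
    intro _ t _ htlen
    refine ⟨rfl, ?_, htlen⟩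
    by_cases h : (t : Int) = m
    · simp [feasB, h]
    · simp [feasB, h]
  | cons b bs ih =>
    intro hbs t hble htlen
    rw [List.pairwise_cons] at hbs
    have hbt : t ≤ cntF ps0 b := hble b (List.mem_cons_self)
    by_cases hbl : b ≤ limit
    · have hstep : gstep limit cap.toNat ps0 t b = min (t + cap.toNat) (cntF ps0 b) := by
        rw [gstep, if_pos hbl]
      have hfill : fill b cap (ps0.drop t) = ps0.drop (min (t + cap.toNat) (cntF ps0 b)) := by
        rw [fill_eq_drop, drop_tw_length b ps0 t hps0 hbt, List.drop_drop]
        congr 1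
        omega
      have hcnt' : min (t + cap.toNat) (cntF ps0 b) ≤ cntF ps0 b := min_le_right _ _
      have hle' : ∀ b' ∈ bs, min (t + cap.toNat) (cntF ps0 b) ≤ cntF ps0 b' := fun b' hb' =>
        le_trans hcnt' (cntF_mono ps0 (hbs.1 b' hb'))
      have htlen' : min (t + cap.toNat) (cntF ps0 b) ≤ ps0.length :=
        le_trans hcnt' (cntF_le_length ps0 b)
      obtain ⟨h1, h2, h3⟩ := ih hbs.2 (min (t + cap.toNat) (cntF ps0 b)) hle' htlen'
      refine ⟨?_, ?_, ?_⟩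
      · rw [runA, List.foldl_cons, if_pos hbl, hfill, List.foldl_cons, hstep]
        exact h1
      · rw [List.map_cons, feasB, if_pos hbl]
        have hcast : min ((t : Int) + cap) ((cntF ps0 b : Nat) : Int)
            = ((min (t + cap.toNat) (cntF ps0 b) : Nat) : Int) := by
          push_cast
          omega
        rw [hcast, List.foldl_cons, hstep]
        exact h2
      · rw [List.foldl_cons, hstep]
        exact h3
    · have hstep : gstep limit cap.toNat ps0 t b = t := by rw [gstep, if_neg hbl]
      have hle' : ∀ b' ∈ bs, t ≤ cntF ps0 b' := fun b' hb' => hble b' (List.mem_cons_of_mem b hb')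
      obtain ⟨h1, h2, h3⟩ := ih hbs.2 t hle' htlen
      refine ⟨?_, ?_, ?_⟩
      · rw [runA, List.foldl_cons, if_neg hbl, List.foldl_cons, hstep]
        exact h1
      · rw [List.map_cons, feasB, if_neg hbl, List.foldl_cons, hstep]
        exact h2
      · rw [List.foldl_cons, hstep]
        exact h3

theorem walkB_spec (b : Int) : ∀ (ps : List Int) (j : Int),
    walkB b ps j = (ps.dropWhile (fun p => decide (p ≤ b)),
      j + ((ps.takeWhile (fun p => decide (p ≤ b))).length : Int)) := by
  intro ps
  induction ps with
  | nil => intro j; simp [walkB]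
  | cons p ps ih =>
    intro j
    by_cases hp : p ≤ b
    · rw [walkB, if_pos hp, ih (j + 1)]
      simp only [List.dropWhile_cons, List.takeWhile_cons, decide_eq_true hp, if_pos True.intro,
        List.length_cons, Prod.mk.injEq]
      refine ⟨trivial, by push_cast; ring⟩
    · rw [walkB, if_neg hp]
      simp only [List.dropWhile_cons, List.takeWhile_cons]
      rw [decide_eq_false hp]
      simp

theorem buildCnt_spec (ps0 : List Int) (hps0 : ps0.Pairwise (· ≤ ·)) :
    ∀ (bs : List Int), bs.Pairwise (· ≤ ·) → ∀ (t : Nat),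
      (∀ b ∈ bs, t ≤ cntF ps0 b) →
      buildCnt bs (ps0.drop t) (t : Int) = bs.map (fun b => ((cntF ps0 b : Nat) : Int)) := by
  intro bs
  induction bs with
  | nil => intro _ t _; rfl
  | cons b bs ih =>
    intro hbs t hble
    rw [List.pairwise_cons] at hbs
    have hbt : t ≤ cntF ps0 b := hble b (List.mem_cons_self)
    have hw : walkB b (ps0.drop t) (t : Int)
        = (ps0.drop (cntF ps0 b), ((cntF ps0 b : Nat) : Int)) := by
      rw [walkB_spec, dropWhile_eq_drop, drop_tw_length b ps0 t hps0 hbt, List.drop_drop]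
      have e1 : t + (cntF ps0 b - t) = cntF ps0 b := by omega
      rw [e1]
      congr 1
      omega
    rw [buildCnt, hw, List.map_cons]
    exact congrArg _ (ih hbs.2 (cntF ps0 b)
      (fun b' hb' => cntF_mono ps0 (hbs.1 b' hb')))

theorem zip_map_self {α β : Type} (f : α → β) : ∀ (l : List α),
    l.zip (l.map f) = l.map (fun x => (x, f x)) := by
  intro l
  induction l with
  | nil => rfl
  | cons x l ih => simp [ih]

theorem search_eq (sb sp cnt : List Int) (cap m : Int)
    (hpred : ∀ x : Int, feasB cap x m (sb.zip cnt) 0 = decide (loopA x cap sb sp cap = [])) :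
    ∀ (n : Nat) (lo hi : Int), (hi - lo).toNat ≤ n →
      searchB sb cnt cap m lo hi = bsearchA sb sp cap lo hi := by
  intro n
  induction n with
  | zero =>
    intro lo hi hn
    rw [searchB, bsearchA, dif_neg (by omega), dif_neg (by omega)]
  | succ n ih =>
    intro lo hi hn
    rw [searchB, bsearchA]
    by_cases h : lo < hi
    · rw [dif_pos h, dif_pos h]
      have hm := PySem.Int.floordiv_two_mid_bounds (lo := lo + 1) (hi := hi) (by omega)
      have e : lo + 1 + hi = lo + hi + 1 := by ring
      rw [e] at hm
      by_cases hP : loopA (PySem.Int.floordiv (lo + hi + 1) 2) cap sb sp cap = []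
      · rw [if_pos (by rw [hpred]; exact decide_eq_true hP), if_pos hP]
        exact ih _ _ (by omega)
      · rw [if_neg (by rw [hpred]; simpa using hP), if_neg hP]
        exact ih _ _ (by omega)
    · rw [dif_neg h, dif_neg h]

-- ===== VERDICT (by name: the statement is the Claim_ definition above) =====
theorem last_possible_departure_spec : Claim_equal_last_possible_departure := by
  intro buses passengers capacity _ hpre
  unfold Spec_last_possible_departure last_possible_departure last_possible_departure_alt
  show bsearchA (PySem.List.sorted buses (fun x => x) false)
        (PySem.List.sorted passengers (fun x => x) false) capacity 0
        (max (PySem.List.pyGetD (PySem.List.sorted buses (fun x => x) false) (-1) 0)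
             (PySem.List.pyGetD (PySem.List.sorted passengers (fun x => x) false) (-1) 0))
      = searchB (PySem.List.sorted buses (fun x => x) false)
        (buildCnt (PySem.List.sorted buses (fun x => x) false)
          (PySem.List.sorted passengers (fun x => x) false) 0) capacity
        ((PySem.List.sorted passengers (fun x => x) false).length : Int) 0
        (max (PySem.List.pyGetD (PySem.List.sorted buses (fun x => x) false) (-1) 0)
             (PySem.List.pyGetD (PySem.List.sorted passengers (fun x => x) false) (-1) 0))
  set sb := PySem.List.sorted buses (fun x => x) false with hsb_def
  set sp := PySem.List.sorted passengers (fun x => x) false with hsp_def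
  have hsb : sb.Pairwise (· ≤ ·) := PySem.List.sorted_pairwise buses (fun x => x)
  have hsp : sp.Pairwise (· ≤ ·) := PySem.List.sorted_pairwise passengers (fun x => x)
  have hspne : sp ≠ [] := by
    intro h
    apply hpre.2
    have hlen : sp.length = passengers.length := by
      rw [hsp_def]; exact PySem.List.length_sorted passengers (fun x => x) false
    rw [h] at hlen
    exact List.length_eq_zero_iff.mp hlen.symm
  have hcnt : buildCnt sb sp 0 = sb.map (fun b => ((cntF sp b : Nat) : Int)) := by
    have := buildCnt_spec sp hsp sb hsb 0 (fun b _ => Nat.zero_le _)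
    simpa using this
  have hpred : ∀ x : Int, feasB capacity x (sp.length : Int) (sb.zip (buildCnt sb sp 0)) 0
      = decide (loopA x capacity sb sp capacity = []) := by
    intro x
    rw [hcnt, zip_map_self]
    by_cases hcap : 0 < capacity
    · obtain ⟨h1, h2, h3⟩ := invMain x capacity hcap sp hsp (sp.length : Int) sb hsb 0
        (fun b _ => Nat.zero_le _) (Nat.zero_le _)
      rw [List.drop_zero] at h1
      rw [loopA_eq_runA, h1]
      have h2' : feasB capacity x (sp.length : Int)
          (sb.map (fun b => (b, (cntF sp b : Int)))) 0
          = decide (((sb.foldl (gstep x capacity.toNat sp) 0 : Nat) : Int) = (sp.length : Int)) := by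
        simpa using h2
      rw [h2']
      apply decide_eq_decide.mpr
      rw [List.drop_eq_nil_iff]
      omega
    · have hA : ¬ loopA x capacity sb sp capacity = [] := by
        rw [loopA_eq_runA, runA_nonpos x capacity hcap]
        exact hspne
      rw [decide_eq_false hA]
      by_cases hF : feasB capacity x (sp.length : Int)
          (sb.map (fun b => (b, (cntF sp b : Int)))) 0 = true
      · exfalso
        have hm := feasB_nonpos capacity x (sp.length : Int) hcap _ _ hF
        have hne : sp.length ≠ 0 := fun h => hspne (List.length_eq_zero_iff.mp h)
        omega
      · exact (Bool.not_eq_true _).mp hF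
  exact (search_eq sb sp (buildCnt sb sp 0) capacity ((sp.length : Int)) hpred
    ((max (PySem.List.pyGetD sb (-1) 0) (PySem.List.pyGetD sp (-1) 0) - 0).toNat) 0
    (max (PySem.List.pyGetD sb (-1) 0) (PySem.List.pyGetD sp (-1) 0)) (le_refl _)).symm
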